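-- pv_equiv track=rewrite | github.com/Sonu64/saving_the_universe_again | google_code_jam.py | isCapable
-- ===== SOURCE A (Python) =====
-- def isCapable(s, able):
--     #checks if an array is capable of withstanding "able"
--     charge = 1
--     damage = 0
--     for step in s:
--         if step == "S":
--             damage += charge
--         if step == "C":
--             charge *= 2
--
--     if damage <= able:
--         return True
--     else:
--         return False
-- ===== SOURCE B (Python) =====
-- def isCapable(s, able):
--     # Each 'S' deals 2**(number of 'C's before it) damage; sum per-position instead of
--     # carrying a running charge accumulator.
--     chars = list(s)
--     damage = sum(2 ** chars[:i].count("C") for i, ch in enumerate(chars) if ch == "S")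
--     return damage <= able
-- ===== Notes on version B (the rewrite author's own statement) =====
-- stated objective: alternative
-- what changed: Replaces the running charge/damage accumulator loop by a declarative per-'S' formulation: damage is the sum over enumerated positions of 2**(count of 'C' in the prefix before each 'S'), and the bool is returned directly as damage <= able.
import Mathlib
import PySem

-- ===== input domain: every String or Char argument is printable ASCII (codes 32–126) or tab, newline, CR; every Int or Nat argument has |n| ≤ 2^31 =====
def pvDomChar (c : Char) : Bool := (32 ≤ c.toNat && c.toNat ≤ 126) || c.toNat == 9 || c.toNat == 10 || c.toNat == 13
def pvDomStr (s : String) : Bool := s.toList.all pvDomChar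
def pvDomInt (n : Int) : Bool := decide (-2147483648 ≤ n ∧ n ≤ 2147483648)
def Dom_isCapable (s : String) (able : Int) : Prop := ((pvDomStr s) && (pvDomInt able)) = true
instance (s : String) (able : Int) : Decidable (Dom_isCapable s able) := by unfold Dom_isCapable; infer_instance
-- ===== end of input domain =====

-- B replaces A's running charge/damage accumulator by a per-'S' prefix-count sum (alternative decomposition, not faster).

-- ===== PORT A =====
def isCapable (s : String) (able : Int) : Bool :=
  let r := s.toList.foldl (fun (cd : Int × Int) step =>
      let damage := if step == 'S' then cd.2 + cd.1 else cd.2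
      let charge := if step == 'C' then cd.1 * 2 else cd.1
      (charge, damage)) (1, 0)
  if r.2 ≤ able then true else false

-- ===== PORT B =====
def isCapable_alt (s : String) (able : Int) : Bool :=
  let chars := s.toList
  -- sum(2 ** chars[:i].count("C") for i, ch in enumerate(chars) if ch == "S")
  let damage : Int := (PySem.List.enumerate chars).foldl
      (fun acc p => if p.2 == 'S'
        then acc + (2 : Int) ^ (PySem.List.count (PySem.List.slice chars none (some p.1)) 'C')
        else acc) 0
  decide (damage ≤ able)

-- ===== PRECONDITION & SPEC =====
def Spec_isCapable (s : String) (able : Int) (out : Bool) : Prop := out = isCapable_alt s able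
instance (s : String) (able : Int) (out : Bool) : Decidable (Spec_isCapable s able out) := by unfold Spec_isCapable; infer_instance

-- ===== CLAIM (what is proved, stated in full; the proofs are below) =====
def Claim_equal_isCapable : Prop := ∀ (s : String) (able : Int), Dom_isCapable s able → Spec_isCapable s able (isCapable s able)

-- ===== LEMMAS AND PROOFS =====

/-- total damage of a step list: each 'S' costs the doubling of every preceding 'C' -/
def gDam : List Char → Int
  | [] => 0
  | ch :: t => (if ch = 'S' then 1 else 0) + (if ch = 'C' then 2 * gDam t else gDam t)

theorem foldA_snd (l : List Char) (c d : Int) :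
    (l.foldl (fun (cd : Int × Int) step =>
      let damage := if step == 'S' then cd.2 + cd.1 else cd.2
      let charge := if step == 'C' then cd.1 * 2 else cd.1
      (charge, damage)) (c, d)).2 = d + c * gDam l := by
  induction l generalizing c d with
  | nil => simp [gDam]
  | cons ch t ih =>
    by_cases hS : ch = 'S'
    · subst hS
      have hne : ('S' : Char) ≠ 'C' := by decide
      simp only [List.foldl_cons, gDam]
      rw [ih]
      simp only [hne, if_false, beq_self_eq_true, if_true, beq_iff_eq]
      ring
    · by_cases hC : ch = 'C'
      · subst hC
        have hne : ('C' : Char) ≠ 'S' := by decide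
        simp only [List.foldl_cons, gDam]
        rw [ih]
        simp only [hne, if_false, beq_self_eq_true, if_true, beq_iff_eq]
        ring
      · simp only [List.foldl_cons, gDam]
        rw [ih]
        simp [hS, hC]

theorem gDam_append (l : List Char) (ch : Char) :
    gDam (l ++ [ch]) = gDam l + (if ch = 'S' then (2 : Int) ^ (l.count 'C') else 0) := by
  induction l with
  | nil => simp [gDam]
  | cons a t ih =>
    simp only [List.cons_append, gDam, ih, List.count_cons]
    by_cases hC : a = 'C'
    · subst hC
      by_cases hS : ch = 'S' <;> (simp [hS, pow_succ]; try ring)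
    · by_cases hS : a = 'S' <;> (simp [hS, hC, beq_iff_eq]; try ring)

/-- B's fold, with the list being sliced (`m`) separated from the list being enumerated -/
def foldB (m l : List Char) (acc : Int) : Int :=
  (PySem.List.enumerate l).foldl
      (fun acc p => if p.2 == 'S'
        then acc + (2 : Int) ^ (PySem.List.count (PySem.List.slice m none (some p.1)) 'C')
        else acc) acc

theorem foldB_eq_gDam (l : List Char) : foldB l l 0 = gDam l := by
  induction l using List.reverseRecOn with
  | nil => simp [foldB, gDam]
  | append_singleton t ch ih =>
    have hstep : foldB (t ++ [ch]) (t ++ [ch]) 0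
        = (if ch = 'S' then foldB (t ++ [ch]) t 0 + (2 : Int) ^ (t.count 'C') else foldB (t ++ [ch]) t 0) := by
      unfold foldB
      rw [PySem.List.enumerate_append, List.foldl_append]
      simp only [PySem.List.enumerate_cons, PySem.List.enumerate_nil, List.foldl_cons, List.foldl_nil]
      have hsl : PySem.List.slice (t ++ [ch]) none (some ((0 : Int) + t.length)) = t := by
        have : ((0 : Int) + t.length) = ((t.length : Nat) : Int) := by ring
        rw [this, PySem.List.slice_to_natCast]
        simp
      rw [hsl]
      by_cases hS : ch = 'S' <;> simp [hS]
    have hpre : foldB (t ++ [ch]) t 0 = foldB t t 0 := by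
      unfold foldB
      apply PySem.List.foldl_congr_mem
      intro acc p hp
      rcases (PySem.List.mem_enumerate_iff _ _ _).1 hp with ⟨k, hk, rfl⟩
      have h1 : PySem.List.slice (t ++ [ch]) none (some ((0 : Int) + k)) = t.take k := by
        have : ((0 : Int) + k) = ((k : Nat) : Int) := by ring
        rw [this, PySem.List.slice_to_natCast, List.take_append_of_le_length (le_of_lt hk)]
      have h2 : PySem.List.slice t none (some ((0 : Int) + k)) = t.take k := by
        have : ((0 : Int) + k) = ((k : Nat) : Int) := by ring
        rw [this, PySem.List.slice_to_natCast]
      rw [h1, h2]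
    rw [hstep, hpre, ih, gDam_append]
    by_cases hS : ch = 'S' <;> simp [hS]

-- ===== VERDICT (by name: the statement is the Claim_ definition above) =====
theorem isCapable_spec : Claim_equal_isCapable := by
  intro s able _
  unfold Spec_isCapable isCapable isCapable_alt
  have hA := foldA_snd s.toList 1 0
  have hB := foldB_eq_gDam s.toList
  unfold foldB at hB
  simp only [hA, hB]
  simp
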